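-- pv_equiv track=rewrite | github.com/TommyX12/structured-knowledge-manager | skm/util.py | get_bracket_match
-- ===== SOURCE A (Python) =====
-- MATCHING_BRACKET = {
--     '(': ')',
--     '[': ']',
--     '{': '}',
--     ')': '(',
--     ']': '[',
--     '}': '{',
-- }
--
-- def get_bracket_match(line):
--     l = len(line)
--     result = [0 for i in range(len(line))]
--     stacks = {
--         '(': [],
--         '[': [],
--         '{': [],
--     }
--     for i in range(len(line)):
--         c = line[i]
--         if c in '([{':
--             stacks[c].append(i)
--
--         elif c in ')]}':
--             c = MATCHING_BRACKET[c]
--             stack = stacks[c]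
--             if len(stack) > 0:
--                 j = stack.pop()
--                 result[i] = j
--                 result[j] = i
--
--     for c in stacks:
--         for i in stacks[c]:
--             result[i] = l
--
--     return result
-- ===== SOURCE B (Python) =====
-- def get_bracket_match(line):
--     n = len(line)
--     result = [0] * n
--     leftovers = []
--     for op, cl in (('(', ')'), ('[', ']'), ('{', '}')):
--         stack = []
--         for i, ch in enumerate(line):
--             if ch == op:
--                 stack.append(i)
--             elif ch == cl:
--                 if stack:
--                     j = stack.pop()
--                     result[i] = j
--                     result[j] = i
--         leftovers.append(stack)
--     for stack in leftovers:
--         for i in stack: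
--             result[i] = n
--     return result
-- ===== Notes on version B (the rewrite author's own statement) =====
-- stated objective: alternative
-- what changed: A's single pass maintaining three dict-keyed stacks simultaneously is replaced by three independent scans of the string, one per bracket pair, each with its own single stack; unmatched opens are marked at the end.
import Mathlib
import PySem

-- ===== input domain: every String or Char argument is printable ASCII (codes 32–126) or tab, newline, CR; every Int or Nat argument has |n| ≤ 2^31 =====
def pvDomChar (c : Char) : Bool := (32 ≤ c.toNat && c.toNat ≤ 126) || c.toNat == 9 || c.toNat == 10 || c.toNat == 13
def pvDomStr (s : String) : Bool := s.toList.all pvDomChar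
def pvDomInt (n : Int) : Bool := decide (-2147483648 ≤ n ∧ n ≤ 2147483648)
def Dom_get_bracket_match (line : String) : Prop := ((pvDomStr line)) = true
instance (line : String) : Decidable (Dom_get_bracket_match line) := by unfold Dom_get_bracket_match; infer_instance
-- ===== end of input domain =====

-- B replaces A's single pass with three dict-keyed stacks by three independent per-bracket-pair scans (alternative decomposition, same cost; return-value equivalence).


-- ===== PORT A =====
-- One pass over the indexed characters; state = (result, stack for '(', stack for '[', stack for '{').
-- Python list-stacks (append/pop at the end) are rendered with the top at the head (cons/pattern-match).
def stepA (st : List Int × List Nat × List Nat × List Nat) (q : Nat × Char) :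
    List Int × List Nat × List Nat × List Nat :=
  match st with
  | (res, s1, s2, s3) =>
    if q.2 = '(' then (res, q.1 :: s1, s2, s3)
    else if q.2 = '[' then (res, s1, q.1 :: s2, s3)
    else if q.2 = '{' then (res, s1, s2, q.1 :: s3)
    else if q.2 = ')' then
      match s1 with
      | [] => (res, s1, s2, s3)
      | j :: t => ((res.set q.1 (j : Int)).set j (q.1 : Int), t, s2, s3)
    else if q.2 = ']' then
      match s2 with
      | [] => (res, s1, s2, s3)
      | j :: t => ((res.set q.1 (j : Int)).set j (q.1 : Int), s1, t, s3)
    else if q.2 = '}' then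
      match s3 with
      | [] => (res, s1, s2, s3)
      | j :: t => ((res.set q.1 (j : Int)).set j (q.1 : Int), s1, s2, t)
    else (res, s1, s2, s3)

-- `for i in stacks[c]: result[i] = l` — the Python list runs bottom-to-top, i.e. our reversed stack.
def markA (l : Nat) (res : List Int) (stk : List Nat) : List Int :=
  stk.reverse.foldl (fun r i => r.set i (l : Int)) res

def get_bracket_match (line : String) : List Int :=
  let cs := line.toList
  let l := cs.length
  let res0 := (List.range l).map (fun _ => (0 : Int))
  let w := (cs.zipIdx.map (fun p => (p.2, p.1))).foldl stepA (res0, [], [], [])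
  markA l (markA l (markA l w.1 w.2.1) w.2.2.1) w.2.2.2

-- ===== PORT B =====
-- One scan per bracket pair, with a single stack (top at the head); leftover opens marked at the end.
def stepT (o c : Char) (st : List Int × List Nat) (q : Nat × Char) : List Int × List Nat :=
  match st with
  | (res, stk) =>
    if q.2 = o then (res, q.1 :: stk)
    else if q.2 = c then
      match stk with
      | [] => (res, stk)
      | j :: t => ((res.set q.1 (j : Int)).set j (q.1 : Int), t)
    else (res, stk)

-- `for i in stack: result[i] = n` — foldr applies the bottom of our head-first stack first, i.e. Python's order.
def markB (l : Nat) (res : List Int) (stk : List Nat) : List Int :=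
  stk.foldr (fun i r => r.set i (l : Int)) res

def get_bracket_match_alt (line : String) : List Int :=
  let cs := line.toList
  let n := cs.length
  let ecs := cs.zipIdx.map (fun p => (p.2, p.1))
  let w1 := ecs.foldl (stepT '(' ')') (List.replicate n (0 : Int), [])
  let w2 := ecs.foldl (stepT '[' ']') (w1.1, [])
  let w3 := ecs.foldl (stepT '{' '}') (w2.1, [])
  markB n (markB n (markB n w3.1 w1.2) w2.2) w3.2

-- ===== PRECONDITION & SPEC =====
def Spec_get_bracket_match (line : String) (out : List Int) : Prop := out = get_bracket_match_alt line
instance (line : String) (out : List Int) : Decidable (Spec_get_bracket_match line out) := by unfold Spec_get_bracket_match; infer_instance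

-- ===== CLAIM (what is proved, stated in full; the proofs are below) =====
def Claim_equal_get_bracket_match : Prop := ∀ (line : String), Dom_get_bracket_match line → Spec_get_bracket_match line (get_bracket_match line)

-- ===== LEMMAS AND PROOFS =====

theorem stepT_open {o c : Char} (st : List Int × List Nat) {q : Nat × Char} (h : q.2 = o) :
    stepT o c st q = (st.1, q.1 :: st.2) := by
  obtain ⟨res, stk⟩ := st; simp [stepT, h]

theorem stepT_close_nil {o c : Char} {res : List Int} {q : Nat × Char}
    (h : q.2 = c) (hne : c ≠ o) :
    stepT o c (res, []) q = (res, []) := by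
  simp [stepT, h, hne]

theorem stepT_close_cons {o c : Char} {res : List Int} {j : Nat} {t : List Nat} {q : Nat × Char}
    (h : q.2 = c) (hne : c ≠ o) :
    stepT o c (res, j :: t) q = ((res.set q.1 (j : Int)).set j (q.1 : Int), t) := by
  simp [stepT, h, hne]

theorem stepT_skip {o c : Char} (st : List Int × List Nat) {q : Nat × Char}
    (h1 : q.2 ≠ o) (h2 : q.2 ≠ c) :
    stepT o c st q = st := by
  obtain ⟨res, stk⟩ := st; simp [stepT, h1, h2]

-- A set at a position no step of the scan ever writes commutes out of the scan.
theorem stT_set (o c : Char) (ecs : List (Nat × Char)) (res : List Int) (stk : List Nat)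
    (p : Nat) (v : Int)
    (hq : ∀ q ∈ ecs, q.1 ≠ p) (hs : ∀ j ∈ stk, j ≠ p) :
    ecs.foldl (stepT o c) (res.set p v, stk) =
      ((ecs.foldl (stepT o c) (res, stk)).1.set p v, (ecs.foldl (stepT o c) (res, stk)).2) := by
  induction ecs generalizing res stk with
  | nil => rfl
  | cons q rest ih =>
    have hq1 : q.1 ≠ p := hq q List.mem_cons_self
    have hq' : ∀ q' ∈ rest, q'.1 ≠ p := fun q' h => hq q' (List.mem_cons_of_mem _ h)
    simp only [List.foldl_cons]
    by_cases h1 : q.2 = o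
    · rw [stepT_open _ h1, stepT_open _ h1]
      exact ih _ _ hq' (fun j hj => by
        rcases List.mem_cons.mp hj with h | h
        · exact h ▸ hq1
        · exact hs j h)
    · by_cases h2 : q.2 = c
      · have hne : c ≠ o := fun hEq => h1 (h2.trans hEq)
        match stk, hs with
        | [], _ =>
          rw [stepT_close_nil h2 hne, stepT_close_nil h2 hne]
          exact ih _ _ hq' (fun j hj => absurd hj List.not_mem_nil)
        | j :: t, hs =>
          have hj : j ≠ p := hs j List.mem_cons_self
          have ht : ∀ i ∈ t, i ≠ p := fun i hi => hs i (List.mem_cons_of_mem _ hi)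
          rw [stepT_close_cons h2 hne, stepT_close_cons h2 hne,
              List.set_comm _ _ (Ne.symm hq1), List.set_comm _ _ (Ne.symm hj)]
          exact ih _ _ hq' ht
      · rw [stepT_skip _ h1 h2, stepT_skip _ h1 h2]
        exact ih _ _ hq' hs

-- The main decomposition: A's simultaneous pass equals the three sequential per-type scans,
-- provided the stacks are pairwise disjoint and disjoint from the (nodup) indices still to come.
theorem sa_decomp (ecs : List (Nat × Char)) (res : List Int) (s1 s2 s3 : List Nat)
    (hn : (ecs.map Prod.fst).Nodup)
    (h1 : ∀ j ∈ s1, ∀ q ∈ ecs, j ≠ q.1)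
    (h2 : ∀ j ∈ s2, ∀ q ∈ ecs, j ≠ q.1)
    (h3 : ∀ j ∈ s3, ∀ q ∈ ecs, j ≠ q.1)
    (d12 : ∀ j ∈ s1, j ∉ s2) (d13 : ∀ j ∈ s1, j ∉ s3) (d23 : ∀ j ∈ s2, j ∉ s3) :
    ecs.foldl stepA (res, s1, s2, s3) =
      ((ecs.foldl (stepT '{' '}')
          ((ecs.foldl (stepT '[' ']')
             ((ecs.foldl (stepT '(' ')') (res, s1)).1, s2)).1, s3)).1,
       (ecs.foldl (stepT '(' ')') (res, s1)).2,
       (ecs.foldl (stepT '[' ']') ((ecs.foldl (stepT '(' ')') (res, s1)).1, s2)).2,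
       (ecs.foldl (stepT '{' '}')
          ((ecs.foldl (stepT '[' ']')
             ((ecs.foldl (stepT '(' ')') (res, s1)).1, s2)).1, s3)).2) := by
  induction ecs generalizing res s1 s2 s3 with
  | nil => rfl
  | cons q rest ih =>
    have hn' : (rest.map Prod.fst).Nodup := (List.nodup_cons.mp hn).2
    have hqf : ∀ q' ∈ rest, q.1 ≠ q'.1 := by
      intro q' h hEq
      exact (List.nodup_cons.mp hn).1 (hEq ▸ List.mem_map_of_mem h)
    have h1' : ∀ j ∈ s1, ∀ q' ∈ rest, j ≠ q'.1 :=
      fun j hj q' hq' => h1 j hj q' (List.mem_cons_of_mem _ hq')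
    have h2' : ∀ j ∈ s2, ∀ q' ∈ rest, j ≠ q'.1 :=
      fun j hj q' hq' => h2 j hj q' (List.mem_cons_of_mem _ hq')
    have h3' : ∀ j ∈ s3, ∀ q' ∈ rest, j ≠ q'.1 :=
      fun j hj q' hq' => h3 j hj q' (List.mem_cons_of_mem _ hq')
    have hq1s1 : q.1 ∉ s1 := fun h => h1 q.1 h q List.mem_cons_self rfl
    have hq1s2 : q.1 ∉ s2 := fun h => h2 q.1 h q List.mem_cons_self rfl
    have hq1s3 : q.1 ∉ s3 := fun h => h3 q.1 h q List.mem_cons_self rfl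
    simp only [List.foldl_cons]
    by_cases c1 : q.2 = '('
    · rw [stepT_open (o := '(') (c := ')') _ c1,
          stepT_skip (o := '[') (c := ']') _ (by simp [c1]) (by simp [c1]),
          stepT_skip (o := '{') (c := '}') _ (by simp [c1]) (by simp [c1])]
      rw [show stepA (res, s1, s2, s3) q = (res, q.1 :: s1, s2, s3) by simp [stepA, c1]]
      try dsimp only
      try dsimp only
      exact ih res (q.1 :: s1) s2 s3 hn'
        (fun j hj => by
          rcases List.mem_cons.mp hj with h | h
          · exact h ▸ hqf
          · exact h1' j h)
        h2' h3'
        (fun j hj => by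
          rcases List.mem_cons.mp hj with h | h
          · exact h ▸ hq1s2
          · exact d12 j h)
        (fun j hj => by
          rcases List.mem_cons.mp hj with h | h
          · exact h ▸ hq1s3
          · exact d13 j h)
        d23
    · by_cases c2 : q.2 = '['
      · rw [stepT_open (o := '[') (c := ']') _ c2,
            stepT_skip (o := '(') (c := ')') _ (by simp [c2]) (by simp [c2]),
            stepT_skip (o := '{') (c := '}') _ (by simp [c2]) (by simp [c2])]
        rw [show stepA (res, s1, s2, s3) q = (res, s1, q.1 :: s2, s3) by simp [stepA, c2]]
        try dsimp only
        exact ih res s1 (q.1 :: s2) s3 hn' h1'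
          (fun j hj => by
            rcases List.mem_cons.mp hj with h | h
            · exact h ▸ hqf
            · exact h2' j h)
          h3'
          (fun j hj h' => by
            rcases List.mem_cons.mp h' with h'' | h''
            · exact hq1s1 (h'' ▸ hj)
            · exact d12 j hj h'')
          d13
          (fun j hj => by
            rcases List.mem_cons.mp hj with h | h
            · exact h ▸ hq1s3
            · exact d23 j h)
      · by_cases c3 : q.2 = '{'
        · rw [stepT_open (o := '{') (c := '}') _ c3,
              stepT_skip (o := '(') (c := ')') _ (by simp [c3]) (by simp [c3]),
              stepT_skip (o := '[') (c := ']') _ (by simp [c3]) (by simp [c3])]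
          rw [show stepA (res, s1, s2, s3) q = (res, s1, s2, q.1 :: s3) by simp [stepA, c3]]
          try dsimp only
          exact ih res s1 s2 (q.1 :: s3) hn' h1' h2'
            (fun j hj => by
              rcases List.mem_cons.mp hj with h | h
              · exact h ▸ hqf
              · exact h3' j h)
            d12
            (fun j hj h' => by
              rcases List.mem_cons.mp h' with h'' | h''
              · exact hq1s1 (h'' ▸ hj)
              · exact d13 j hj h'')
            (fun j hj h' => by
              rcases List.mem_cons.mp h' with h'' | h''
              · exact hq1s2 (h'' ▸ hj)
              · exact d23 j hj h'')
        · by_cases c4 : q.2 = ')'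
          · rw [stepT_skip (o := '[') (c := ']') _ (by simp [c4]) (by simp [c4]),
                stepT_skip (o := '{') (c := '}') _ (by simp [c4]) (by simp [c4])]
            match s1, h1, d12, d13 with
            | [], h1, d12, d13 =>
              rw [stepT_close_nil (o := '(') c4 (by decide),
                  show stepA (res, [], s2, s3) q = (res, [], s2, s3) by
                    simp [stepA, c4]]
              try dsimp only
              exact ih res [] s2 s3 hn' h1' h2' h3' d12 d13 d23
            | j :: t, h1, d12, d13 =>
              rw [stepT_close_cons (o := '(') c4 (by decide),
                  show stepA (res, j :: t, s2, s3) q =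
                      ((res.set q.1 (j : Int)).set j (q.1 : Int), t, s2, s3) by
                    simp [stepA, c4]]
              try dsimp only
              exact ih _ t s2 s3 hn' (fun i hi => h1' i (List.mem_cons_of_mem _ hi)) h2' h3'
                (fun i hi => d12 i (List.mem_cons_of_mem _ hi))
                (fun i hi => d13 i (List.mem_cons_of_mem _ hi)) d23
          · by_cases c5 : q.2 = ']'
            · rw [stepT_skip (o := '(') (c := ')') _ (by simp [c5]) (by simp [c5]),
                  stepT_skip (o := '{') (c := '}') _ (by simp [c5]) (by simp [c5])]
              match s2, h2, d12, d23 with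
              | [], h2, d12, d23 =>
                rw [stepT_close_nil (o := '[') c5 (by decide),
                    show stepA (res, s1, [], s3) q = (res, s1, [], s3) by
                      simp [stepA, c5]]
                try dsimp only
                exact ih res s1 [] s3 hn' h1' h2' h3' d12 d13 d23
              | j :: t, h2, d12, d23 =>
                have hjrest : ∀ q' ∈ rest, q'.1 ≠ j :=
                  fun q' h => (h2 j List.mem_cons_self q' (List.mem_cons_of_mem _ h)).symm
                have hjs1 : ∀ i ∈ s1, i ≠ j := fun i hi hEq =>
                  d12 i hi (hEq ▸ List.mem_cons_self)
                have hqrest : ∀ q' ∈ rest, q'.1 ≠ q.1 := fun q' h => (hqf q' h).symm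
                have hqs1 : ∀ i ∈ s1, i ≠ q.1 := fun i hi hEq => hq1s1 (hEq ▸ hi)
                rw [stepT_close_cons (o := '[') c5 (by decide),
                    show stepA (res, s1, j :: t, s3) q =
                        ((res.set q.1 (j : Int)).set j (q.1 : Int), s1, t, s3) by
                      simp [stepA, c5]]
                try dsimp only
                rw [ih _ s1 t s3 hn' h1' (fun i hi => h2' i (List.mem_cons_of_mem _ hi)) h3'
                      (fun i hi hm => d12 i hi (List.mem_cons_of_mem _ hm)) d13
                      (fun i hi => d23 i (List.mem_cons_of_mem _ hi))]
                try dsimp only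
                rw [stT_set '(' ')' rest _ s1 j ((q.1 : Nat) : Int) hjrest hjs1,
                    stT_set '(' ')' rest res s1 q.1 ((j : Nat) : Int) hqrest hqs1]
                try dsimp only
            · by_cases c6 : q.2 = '}'
              · rw [stepT_skip (o := '(') (c := ')') _ (by simp [c6]) (by simp [c6]),
                    stepT_skip (o := '[') (c := ']') _ (by simp [c6]) (by simp [c6])]
                match s3, h3, d13, d23 with
                | [], h3, d13, d23 =>
                  rw [stepT_close_nil (o := '{') c6 (by decide),
                      show stepA (res, s1, s2, []) q = (res, s1, s2, []) by
                        simp [stepA, c6]]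
                  try dsimp only
                  exact ih res s1 s2 [] hn' h1' h2' h3' d12 d13 d23
                | j :: t, h3, d13, d23 =>
                  have hjrest : ∀ q' ∈ rest, q'.1 ≠ j :=
                    fun q' h => (h3 j List.mem_cons_self q' (List.mem_cons_of_mem _ h)).symm
                  have hjs1 : ∀ i ∈ s1, i ≠ j := fun i hi hEq =>
                    d13 i hi (hEq ▸ List.mem_cons_self)
                  have hjs2 : ∀ i ∈ s2, i ≠ j := fun i hi hEq =>
                    d23 i hi (hEq ▸ List.mem_cons_self)
                  have hqrest : ∀ q' ∈ rest, q'.1 ≠ q.1 := fun q' h => (hqf q' h).symm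
                  have hqs1 : ∀ i ∈ s1, i ≠ q.1 := fun i hi hEq => hq1s1 (hEq ▸ hi)
                  have hqs2 : ∀ i ∈ s2, i ≠ q.1 := fun i hi hEq => hq1s2 (hEq ▸ hi)
                  rw [stepT_close_cons (o := '{') c6 (by decide),
                      show stepA (res, s1, s2, j :: t) q =
                          ((res.set q.1 (j : Int)).set j (q.1 : Int), s1, s2, t) by
                        simp [stepA, c6]]
                  try dsimp only
                  rw [ih _ s1 s2 t hn' h1' h2'
                        (fun i hi => h3' i (List.mem_cons_of_mem _ hi)) d12
                        (fun i hi hm => d13 i hi (List.mem_cons_of_mem _ hm))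
                        (fun i hi hm => d23 i hi (List.mem_cons_of_mem _ hm))]
                  try dsimp only
                  rw [stT_set '(' ')' rest _ s1 j ((q.1 : Nat) : Int) hjrest hjs1,
                      stT_set '(' ')' rest res s1 q.1 ((j : Nat) : Int) hqrest hqs1,
                      stT_set '[' ']' rest _ s2 j ((q.1 : Nat) : Int) hjrest hjs2,
                      stT_set '[' ']' rest _ s2 q.1 ((j : Nat) : Int) hqrest hqs2]
                  try dsimp only
              · rw [stepT_skip (o := '(') (c := ')') _ c1 c4, stepT_skip (o := '[') (c := ']') _ c2 c5,
                    stepT_skip (o := '{') (c := '}') _ c3 c6,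
                    show stepA (res, s1, s2, s3) q = (res, s1, s2, s3) by
                      simp [stepA, c1, c2, c3, c4, c5, c6]]
                try dsimp only
                exact ih res s1 s2 s3 hn' h1' h2' h3' d12 d13 d23

theorem markA_eq_markB (l : Nat) (res : List Int) (stk : List Nat) :
    markA l res stk = markB l res stk := by
  simp [markA, markB, List.foldl_reverse]

theorem enum_fst_nodup (cs : List Char) :
    ((cs.zipIdx.map (fun p => (p.2, p.1))).map Prod.fst).Nodup := by
  have h : ((cs.zipIdx.map (fun p => (p.2, p.1))).map Prod.fst : List Nat)
      = cs.zipIdx.map Prod.snd := by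
    rw [List.map_map]; rfl
  rw [h]
  exact List.nodup_zipIdx_map_snd _

-- ===== VERDICT (by name: the statement is the Claim_ definition above) =====
theorem get_bracket_match_spec : Claim_equal_get_bracket_match := by
  intro line _
  unfold Spec_get_bracket_match get_bracket_match get_bracket_match_alt
  simp only
  rw [show ((List.range line.toList.length).map (fun _ => (0 : Int)))
        = List.replicate line.toList.length (0 : Int) by simp]
  rw [sa_decomp _ _ [] [] [] (enum_fst_nodup line.toList)
        (by simp) (by simp) (by simp) (by simp) (by simp) (by simp)]
  simp only [markA_eq_markB]
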